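-- pv_equiv track=rewrite | github.com/ahmedalaa14/Leetcode | 1829-Maximum-XOR-for-Each-Query.py | getMaximumXor
-- ===== SOURCE A (Python) =====
-- def getMaximumXor(nums, maximumBit):
--     answer = [0] * len(nums)
--     totalXor = 0
--     maxNum = (1 << maximumBit) - 1  # maxNum with all bits set up to maximumBit
--
--     for i in range(len(nums)):
--         totalXor ^= nums[i]  # Update cumulative XOR
--         answer[len(nums) - i - 1] = totalXor ^ maxNum  # Calculate k and store in reverse order
--
--     return answer
-- ===== SOURCE B (Python) =====
-- def getMaximumXor(nums, maximumBit):
--     maxNum = (1 << maximumBit) - 1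
--     total = 0
--     for x in nums:
--         total ^= x
--     if not nums:
--         return []
--     answer = [total ^ maxNum]
--     running = total
--     for j in range(1, len(nums)):
--         running ^= nums[len(nums) - j]
--         answer.append(running ^ maxNum)
--     return answer
-- ===== Notes on version B (the rewrite author's own statement) =====
-- stated objective: alternative
-- what changed: B aggregates the whole list's XOR in one forward pass, then builds the answer front-to-back by peeling elements off the tail of the total XOR, instead of A's reverse-filling of a preallocated array with cumulative prefix XORs.
import Mathlib
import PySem

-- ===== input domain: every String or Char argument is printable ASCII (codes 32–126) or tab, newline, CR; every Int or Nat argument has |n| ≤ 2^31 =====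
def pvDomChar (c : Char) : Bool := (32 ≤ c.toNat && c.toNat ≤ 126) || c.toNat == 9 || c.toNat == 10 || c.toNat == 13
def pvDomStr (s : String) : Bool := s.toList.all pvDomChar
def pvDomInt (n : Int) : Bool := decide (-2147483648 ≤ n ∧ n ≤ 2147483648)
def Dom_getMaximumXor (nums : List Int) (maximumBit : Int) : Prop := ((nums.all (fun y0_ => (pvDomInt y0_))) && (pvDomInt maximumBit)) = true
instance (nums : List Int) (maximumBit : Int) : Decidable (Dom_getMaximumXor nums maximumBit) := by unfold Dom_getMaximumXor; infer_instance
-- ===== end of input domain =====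

-- B aggregates the total XOR in one forward pass and builds the answer front-to-back by
-- peeling elements off the tail, instead of A's reverse-filling with cumulative prefix XORs.

-- ===== PORT A =====
-- 1 << maximumBit is 2 ^ maximumBit (maximumBit ≥ 0 by Pre_); Int.xor is Python's ^ on ints.
-- nums[i] with i drawn from range(len(nums)) is always in range, so getD i 0 is exact here.
def getMaximumXor (nums : List Int) (maximumBit : Int) : List Int :=
  let n := nums.length
  let maxNum : Int := (2 : Int) ^ maximumBit.toNat - 1
  ((List.range n).foldl
    (fun (st : List Int × Int) i =>
      let totalXor := Int.xor st.2 (nums.getD i 0)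
      (st.1.set (n - i - 1) (Int.xor totalXor maxNum), totalXor))
    (List.replicate n 0, 0)).1

-- ===== PORT B =====
-- total ^= x over all of nums; then for j in range(1, n): running ^= nums[n - j]; append
def getMaximumXor_alt (nums : List Int) (maximumBit : Int) : List Int :=
  let n := nums.length
  let maxNum : Int := (2 : Int) ^ maximumBit.toNat - 1
  let total := nums.foldl (fun a x => Int.xor a x) 0
  if n = 0 then []
  else
    ((List.range' 1 (n - 1)).foldl
      (fun (st : List Int × Int) j =>
        let running := Int.xor st.2 (nums.getD (n - j) 0)
        (st.1 ++ [Int.xor running maxNum], running))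
      ([Int.xor total maxNum], total)).1

-- ===== PRECONDITION & SPEC =====
-- Python raises ValueError ("negative shift count") for maximumBit < 0, in A and in B alike.
def Pre_getMaximumXor (nums : List Int) (maximumBit : Int) : Prop := 0 ≤ maximumBit
instance (nums : List Int) (maximumBit : Int) : Decidable (Pre_getMaximumXor nums maximumBit) := by unfold Pre_getMaximumXor; infer_instance
def pvWitness_getMaximumXor : List Int × Int := ([3, 1, 2], 2)

def Spec_getMaximumXor (nums : List Int) (maximumBit : Int) (out : List Int) : Prop := out = getMaximumXor_alt nums maximumBit
instance (nums : List Int) (maximumBit : Int) (out : List Int) : Decidable (Spec_getMaximumXor nums maximumBit out) := by unfold Spec_getMaximumXor; infer_instance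

-- ===== CLAIM (what is proved, stated in full; the proofs are below) =====
def Claim_equal_getMaximumXor : Prop := ∀ (nums : List Int) (maximumBit : Int), Dom_getMaximumXor nums maximumBit → Pre_getMaximumXor nums maximumBit → Spec_getMaximumXor nums maximumBit (getMaximumXor nums maximumBit)

-- ===== LEMMAS AND PROOFS =====

lemma intXor_cancel (a b : Int) : Int.xor (Int.xor a b) b = a := by
  cases a <;> cases b <;> simp [Int.xor]

-- XOR of the first k elements of nums (A's running totalXor after k steps).
def pfx (nums : List Int) (k : Nat) : Int := (nums.take k).foldl (fun a x => Int.xor a x) 0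

lemma pfx_succ (nums : List Int) (k : Nat) (h : k < nums.length) :
    pfx nums (k + 1) = Int.xor (pfx nums k) nums[k] := by
  unfold pfx
  rw [List.take_add_one, List.getElem?_eq_getElem h, List.foldl_append]
  rfl

-- The positions A's loop has written after m iterations, as an explicit iterated set.
def applySets (nums : List Int) (maxNum : Int) (a : List Int) : Nat → List Int
  | 0 => a
  | m + 1 => (applySets nums maxNum a m).set (nums.length - m - 1) (Int.xor (pfx nums (m + 1)) maxNum)

lemma applySets_length (nums : List Int) (maxNum : Int) (a : List Int) (m : Nat) :
    (applySets nums maxNum a m).length = a.length := by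
  induction m with
  | zero => rfl
  | succ m ih => simp [applySets, ih]

lemma loopA_eq (nums : List Int) (maxNum : Int) (a : List Int) (m : Nat) (hm : m ≤ nums.length) :
    (List.range m).foldl
      (fun (st : List Int × Int) i =>
        let totalXor := Int.xor st.2 (nums.getD i 0)
        (st.1.set (nums.length - i - 1) (Int.xor totalXor maxNum), totalXor))
      (a, 0) = (applySets nums maxNum a m, pfx nums m) := by
  induction m with
  | zero => simp [applySets, pfx]
  | succ m ih =>
    have hm' : m < nums.length := hm
    rw [List.range_succ, List.foldl_append, ih (Nat.le_of_lt hm')]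
    simp only [List.foldl_cons, List.foldl_nil, applySets]
    rw [List.getD_eq_getElem _ _ hm', ← pfx_succ nums m hm']

lemma applySets_getElem (nums : List Int) (maxNum : Int) (a : List Int)
    (ha : a.length = nums.length) (m : Nat) (hm : m ≤ nums.length)
    (j : Nat) (hj : j < nums.length) :
    (applySets nums maxNum a m)[j]'(by rw [applySets_length, ha]; exact hj) =
      if nums.length - m ≤ j then Int.xor (pfx nums (nums.length - j)) maxNum
      else a[j]'(by rw [ha]; exact hj) := by
  induction m with
  | zero => simp [applySets]; omega
  | succ m ih =>
    simp only [applySets]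
    by_cases hje : j = nums.length - m - 1
    · subst hje
      rw [List.getElem_set_self]
      have h1 : nums.length - (nums.length - m - 1) = m + 1 := by omega
      rw [h1, if_pos (by omega)]
    · rw [List.getElem_set_ne (by omega), ih (by omega)]
      by_cases hc : nums.length - m ≤ j
      · rw [if_pos hc, if_pos (by omega)]
      · rw [if_neg hc, if_neg (by omega)]

lemma getMaximumXor_length (nums : List Int) (maximumBit : Int) :
    (getMaximumXor nums maximumBit).length = nums.length := by
  unfold getMaximumXor
  simp only [loopA_eq nums _ (List.replicate nums.length 0) nums.length le_rfl]
  simp [applySets_length]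

-- A's result, pointwise.
lemma getMaximumXor_getElem (nums : List Int) (maximumBit : Int) (j : Nat)
    (hj : j < nums.length) :
    (getMaximumXor nums maximumBit)[j]'(by rw [getMaximumXor_length]; exact hj) =
      Int.xor (pfx nums (nums.length - j)) ((2 : Int) ^ maximumBit.toNat - 1) := by
  unfold getMaximumXor
  simp only [loopA_eq nums _ (List.replicate nums.length 0) nums.length le_rfl]
  rw [applySets_getElem nums _ _ (by simp) nums.length le_rfl j hj]
  simp

-- B's loop: the appended accumulator is a map over the index range, running stays pfx (n - k).
lemma loopB_eq (nums : List Int) (maxNum : Int) (acc : List Int) (k : Nat)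
    (hk : k ≤ nums.length - 1) (hn : 1 ≤ nums.length) :
    (List.range' 1 k).foldl
      (fun (st : List Int × Int) j =>
        let running := Int.xor st.2 (nums.getD (nums.length - j) 0)
        (st.1 ++ [Int.xor running maxNum], running))
      (acc, pfx nums nums.length) =
    (acc ++ (List.range' 1 k).map (fun j => Int.xor (pfx nums (nums.length - j)) maxNum),
      pfx nums (nums.length - k)) := by
  induction k with
  | zero => simp
  | succ k ih =>
    rw [List.range'_concat, List.foldl_append, ih (by omega)]
    simp only [List.foldl_cons, List.foldl_nil, List.map_append, List.map_cons, List.map_nil,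
      List.append_assoc, Nat.one_mul, Nat.add_comm 1 k]
    have hidx : nums.length - (k + 1) < nums.length := by omega
    rw [List.getD_eq_getElem _ _ hidx]
    have hstep : pfx nums (nums.length - k) =
        Int.xor (pfx nums (nums.length - (k + 1))) nums[nums.length - (k + 1)] := by
      have h3 : nums.length - k = (nums.length - (k + 1)) + 1 := by omega
      rw [h3, pfx_succ nums _ hidx]
    rw [hstep, intXor_cancel]

-- B's result, as a map over indices 0..n-1.
lemma getMaximumXor_alt_eq_map (nums : List Int) (maximumBit : Int) :
    getMaximumXor_alt nums maximumBit =
      (List.range nums.length).map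
        (fun j => Int.xor (pfx nums (nums.length - j)) ((2 : Int) ^ maximumBit.toNat - 1)) := by
  unfold getMaximumXor_alt
  by_cases h0 : nums.length = 0
  · simp [h0]
  · simp only [if_neg h0]
    have htot : nums.foldl (fun a x => Int.xor a x) 0 = pfx nums nums.length := by
      simp [pfx]
    rw [htot, loopB_eq nums _ _ (nums.length - 1) le_rfl (by omega)]
    have hr : List.range nums.length = 0 :: List.range' 1 (nums.length - 1) := by
      rw [List.range_eq_range']
      have h4 : nums.length = (nums.length - 1) + 1 := by omega
      rw [h4, List.range'_succ]
      norm_num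
    rw [hr, List.map_cons]
    simp

-- ===== VERDICT (by name: the statement is the Claim_ definition above) =====
theorem getMaximumXor_spec : Claim_equal_getMaximumXor := by
  intro nums maximumBit _ _
  unfold Spec_getMaximumXor
  rw [getMaximumXor_alt_eq_map]
  apply List.ext_getElem
  · simp [getMaximumXor_length]
  · intro j hj1 hj2
    have hjn : j < nums.length := by
      simpa [getMaximumXor_length] using hj1
    rw [getMaximumXor_getElem nums maximumBit j hjn]
    simp
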